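-- pv_equiv track=rewrite | github.com/zehidu/seleniumFacebook | run_login.py | xpath_literal
-- ===== SOURCE A (Python) =====
-- def xpath_literal(s: str) -> str:
--     # Safe quoting for XPath string literals.
--     if "'" not in s:
--         return f"'{s}'"
--     if '"' not in s:
--         return f'"{s}"'
--     parts = s.split("'")
--     expr_parts: list[str] = []
--     for i, part in enumerate(parts):
--         expr_parts.append(f"'{part}'")
--         if i != len(parts) - 1:
--             expr_parts.append("\"'\"")
--     return "concat(" + ", ".join(expr_parts) + ")"
-- ===== SOURCE B (Python) =====
-- def xpath_literal(s: str) -> str: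
--     # Safe quoting for XPath string literals.
--     if "'" not in s:
--         return f"'{s}'"
--     if '"' not in s:
--         return f'"{s}"'
--     return "concat('" + s.replace("'", "', \"'\", '") + "')"
-- ===== Notes on version B (the rewrite author's own statement) =====
-- stated objective: simpler
-- what changed: The split/enumerate loop that builds a list of quoted parts and joins them is replaced by a single str.replace substituting each single quote with the concat-glue fragment inside one template string.
import Mathlib
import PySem

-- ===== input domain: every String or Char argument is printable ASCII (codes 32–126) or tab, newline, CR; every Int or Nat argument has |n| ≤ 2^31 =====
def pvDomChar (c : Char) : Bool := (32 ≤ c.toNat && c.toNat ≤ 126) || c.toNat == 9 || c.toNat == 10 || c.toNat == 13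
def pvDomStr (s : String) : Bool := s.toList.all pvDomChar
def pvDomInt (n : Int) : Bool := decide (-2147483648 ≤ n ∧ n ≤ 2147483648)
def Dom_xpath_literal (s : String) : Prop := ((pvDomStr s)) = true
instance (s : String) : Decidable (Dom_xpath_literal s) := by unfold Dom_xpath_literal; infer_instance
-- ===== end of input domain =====

-- B replaces A's split/enumerate/join construction of the concat(...) expression by a single
-- str.replace substituting each single quote with the concat-glue fragment (objective: simpler).

-- ===== PORT A =====
def xpath_literal (s : String) : String :=
  if PySem.Str.isIn "'" s = false then
    String.ofList ('\'' :: (s.toList ++ ['\'']))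
  else if PySem.Str.isIn "\"" s = false then
    String.ofList ('"' :: (s.toList ++ ['"']))
  else
    let parts : List (List Char) := PySem.Chars.splitOn s.toList ['\'']
    let exprParts : List (List Char) :=
      (PySem.List.enumerate parts 0).foldl
        (fun acc ip =>
          let acc1 := acc ++ ['\'' :: (ip.2 ++ ['\''])]
          if ip.1 ≠ (parts.length : Int) - 1 then acc1 ++ ["\"'\"".toList] else acc1)
        []
    String.ofList ("concat(".toList ++ PySem.Chars.join ", ".toList exprParts ++ [')'])

-- ===== PORT B =====
def xpath_literal_alt (s : String) : String :=
  if PySem.Str.isIn "'" s = false then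
    String.ofList ('\'' :: (s.toList ++ ['\'']))
  else if PySem.Str.isIn "\"" s = false then
    String.ofList ('"' :: (s.toList ++ ['"']))
  else
    String.ofList ("concat('".toList ++
      PySem.Chars.replace s.toList ['\''] "', \"'\", '".toList ++ "')".toList)

-- ===== PRECONDITION & SPEC =====
def Spec_xpath_literal (s : String) (out : String) : Prop := out = xpath_literal_alt s
instance (s : String) (out : String) : Decidable (Spec_xpath_literal s out) := by unfold Spec_xpath_literal; infer_instance

-- ===== CLAIM (what is proved, stated in full; the proofs are below) =====
def Claim_equal_xpath_literal : Prop := ∀ (s : String), Dom_xpath_literal s → Spec_xpath_literal s (xpath_literal s)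

-- ===== LEMMAS AND PROOFS =====

-- the glue string "', \"'\", '" as a char list
def pvR : List Char := "', \"'\", '".toList

-- structural version of s.replace("'", glue)
def pvRepl : List Char → List Char
  | [] => []
  | c :: t => if c = '\'' then pvR ++ pvRepl t else c :: pvRepl t

-- structural version of s.split("'")
def pvSp : List Char → List (List Char)
  | [] => [[]]
  | c :: t => if c = '\'' then [] :: pvSp t
      else match pvSp t with
        | [] => [[c]]
        | h :: r => (c :: h) :: r

def pvDq : List Char := "\"'\"".toList
def pvSep : List Char := ", ".toList
def pvQe (p : List Char) : List Char := '\'' :: (p ++ ['\''])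

-- the expr_parts list A builds: quoted parts interleaved with "\"'\""
def pvInterleave : List (List Char) → List (List Char)
  | [] => []
  | [p] => [pvQe p]
  | p :: q :: r => pvQe p :: pvDq :: pvInterleave (q :: r)

theorem pvReplace_go_eq (l : List Char) : ∀ (fuel : Nat) (acc : List Char), l.length ≤ fuel →
    PySem.Chars.replace.go ['\''] pvR fuel l acc = acc.reverse ++ pvRepl l := by
  induction l with
  | nil => intro fuel acc h; cases fuel <;> simp [PySem.Chars.replace.go, pvRepl]
  | cons c t ih =>
    intro fuel acc h
    cases fuel with
    | zero => simp at h
    | succ f =>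
      simp only [PySem.Chars.replace.go]
      by_cases hc : c = '\''
      · subst hc
        rw [if_pos (by simp [List.isPrefixOf])]
        simp only [List.length_cons, List.length_nil, Nat.zero_add, List.drop_succ_cons, List.drop_zero]
        rw [ih f _ (by simpa using h)]
        simp [pvRepl, pvR]
      · rw [if_neg (by simp [List.isPrefixOf]; exact fun hh => hc hh.symm)]
        rw [ih f _ (by simpa using h)]
        simp [pvRepl, hc]

theorem pvReplace_eq (l : List Char) : PySem.Chars.replace l ['\''] pvR = pvRepl l := by
  rw [PySem.Chars.replace]
  rw [if_neg (by simp [List.isEmpty])]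
  simpa using pvReplace_go_eq l l.length [] le_rfl

theorem pvSp_ne_nil (l : List Char) : pvSp l ≠ [] := by
  cases l with
  | nil => simp [pvSp]
  | cons c t =>
    simp only [pvSp]
    split
    · simp
    · split <;> simp

theorem pvSplitOn_go_eq (l : List Char) : ∀ (fuel : Nat) (cur : List Char) (acc : List (List Char)),
    l.length ≤ fuel →
    PySem.Chars.splitOn.go ['\''] (fuel + 1) l cur acc =
      acc.reverse ++ ((cur.reverse ++ (pvSp l).headI) :: (pvSp l).tail) := by
  induction l with
  | nil => intro fuel cur acc h; cases fuel <;> simp [PySem.Chars.splitOn.go, pvSp]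
  | cons c t ih =>
    intro fuel cur acc h
    cases fuel with
    | zero => simp at h
    | succ f =>
      simp only [PySem.Chars.splitOn.go]
      by_cases hc : c = '\''
      · subst hc
        rw [if_pos (by simp [List.isPrefixOf])]
        simp only [List.length_cons, List.length_nil, Nat.zero_add, List.drop_succ_cons, List.drop_zero]
        rw [ih f _ _ (by simpa using h)]
        simp only [pvSp, List.reverse_nil, List.nil_append]
        have hs := pvSp_ne_nil t
        cases hsp : pvSp t with
        | nil => exact absurd hsp hs
        | cons hh r => simp
      · rw [if_neg (by simp [List.isPrefixOf]; exact fun hh => hc hh.symm)]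
        rw [ih f _ _ (by simpa using h)]
        have hs := pvSp_ne_nil t
        simp only [pvSp, if_neg hc]
        cases hsp : pvSp t with
        | nil => exact absurd hsp hs
        | cons h r => simp [hsp]

theorem pvSplitOn_eq (l : List Char) : PySem.Chars.splitOn l ['\''] = pvSp l := by
  rw [PySem.Chars.splitOn]
  rw [pvSplitOn_go_eq l l.length [] [] le_rfl]
  have hs := pvSp_ne_nil l
  cases hsp : pvSp l with
  | nil => exact absurd hsp hs
  | cons h r => simp

-- A's loop over enumerate(parts) builds pvInterleave, whatever suffix position it starts at
theorem pvFold_enum_eq (n : Nat) : ∀ (suffix : List (List Char)) (k : Nat)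
    (acc : List (List Char)), k + suffix.length = n →
    (PySem.List.enumerate suffix (k : Int)).foldl
      (fun acc ip =>
        if ip.1 ≠ (n : Int) - 1 then acc ++ [pvQe ip.2] ++ [pvDq] else acc ++ [pvQe ip.2]) acc
      = acc ++ pvInterleave suffix := by
  intro suffix
  induction suffix with
  | nil => intro k acc h; simp [PySem.List.enumerate, pvInterleave]
  | cons p rest ih =>
    intro k acc h
    rw [PySem.List.enumerate_cons]
    simp only [List.foldl_cons]
    cases rest with
    | nil =>
      have hk : (k : Int) = (n : Int) - 1 := by simp at h; omega
      simp [PySem.List.enumerate, pvInterleave, hk]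
    | cons q r =>
      have hk : (k : Int) ≠ (n : Int) - 1 := by simp at h; omega
      rw [if_pos hk]
      have hcast : (k : Int) + 1 = ((k + 1 : Nat) : Int) := by push_cast; ring
      rw [hcast, ih (k + 1) _ (by simp at h ⊢; omega)]
      simp [pvInterleave]

theorem pvInterleave_ne_nil (h : List Char) (r : List (List Char)) : pvInterleave (h :: r) ≠ [] := by
  cases r <;> simp [pvInterleave]

theorem pvJoin_cons_of_ne_nil (a : List Char) (l : List (List Char)) (hl : l ≠ []) :
    PySem.Chars.join pvSep (a :: l) = a ++ pvSep ++ PySem.Chars.join pvSep l := by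
  cases l with
  | nil => exact absurd rfl hl
  | cons b m => rw [PySem.Chars.join_cons_cons]

-- joining A's expr_parts with ", " is exactly B's quote-wrapped replace
theorem pvJoin_interleave_sp (cs : List Char) :
    PySem.Chars.join pvSep (pvInterleave (pvSp cs)) = '\'' :: (pvRepl cs ++ ['\'']) := by
  induction cs with
  | nil => decide
  | cons c t ih =>
    obtain ⟨h, r, hsp⟩ := List.exists_cons_of_ne_nil (pvSp_ne_nil t)
    by_cases hc : c = '\''
    · subst hc
      have hsp' : pvSp ('\'' :: t) = [] :: h :: r := by simp [pvSp, hsp]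
      rw [hsp', show pvInterleave ([] :: h :: r) = pvQe [] :: pvDq :: pvInterleave (h :: r) from rfl]
      rw [pvJoin_cons_of_ne_nil _ _ (by simp), pvJoin_cons_of_ne_nil _ _ (pvInterleave_ne_nil h r)]
      rw [← hsp] at *
      rw [ih]
      simp [pvQe, pvDq, pvSep, pvR, pvRepl]
    · have hsp' : pvSp (c :: t) = (c :: h) :: r := by simp [pvSp, hc, hsp]
      rw [hsp']
      rw [hsp] at ih
      cases r with
      | nil =>
        rw [show pvInterleave [c :: h] = [pvQe (c :: h)] from rfl]
        rw [show pvInterleave [h] = [pvQe h] from rfl] at ih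
        rw [PySem.Chars.join_singleton] at ih ⊢
        simp only [pvQe, List.cons.injEq, true_and] at ih
        simp [pvQe, pvRepl, hc, ih]
      | cons h2 r2 =>
        rw [show pvInterleave ((c :: h) :: h2 :: r2) = pvQe (c :: h) :: pvDq :: pvInterleave (h2 :: r2) from rfl]
        rw [show pvInterleave (h :: h2 :: r2) = pvQe h :: pvDq :: pvInterleave (h2 :: r2) from rfl] at ih
        rw [pvJoin_cons_of_ne_nil _ _ (by simp)] at ih ⊢
        rw [pvJoin_cons_of_ne_nil _ _ (pvInterleave_ne_nil h2 r2)] at ih ⊢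
        simp only [pvQe, List.append_assoc, List.cons_append, List.nil_append] at ih ⊢
        simp only [List.cons.injEq, true_and] at ih
        simp [pvRepl, hc, ih]

-- ===== VERDICT (by name: the statement is the Claim_ definition above) =====
theorem xpath_literal_spec : Claim_equal_xpath_literal := by
  intro s _
  unfold Spec_xpath_literal xpath_literal xpath_literal_alt
  split
  · rfl
  · split
    · rfl
    · apply congrArg String.ofList
      rw [pvSplitOn_eq]
      rw [show (fun (acc : List (List Char)) (ip : Int × List Char) =>
            let acc1 := acc ++ ['\'' :: (ip.2 ++ ['\''])]
            if ip.1 ≠ ((pvSp s.toList).length : Int) - 1 then acc1 ++ ["\"'\"".toList] else acc1)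
          = (fun acc ip =>
            if ip.1 ≠ (((pvSp s.toList).length : Nat) : Int) - 1 then acc ++ [pvQe ip.2] ++ [pvDq]
            else acc ++ [pvQe ip.2]) from rfl]
      rw [show (0 : Int) = ((0 : Nat) : Int) from rfl]
      rw [pvFold_enum_eq (pvSp s.toList).length (pvSp s.toList) 0 [] (by simp)]
      rw [show ", ".toList = pvSep from rfl, show "', \"'\", '".toList = pvR from rfl]
      rw [List.nil_append, pvJoin_interleave_sp, pvReplace_eq]
      simp [pvRepl]
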